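-- pv_equiv track=rewrite | github.com/ShivanshiSharma05/ai-code-assistant | backend/model.py | generate_comment
-- ===== SOURCE A (Python) =====
-- def generate_comment(code: str):
--     lines = code.strip().split("\n")
--     explanation = []
--
--     for line in lines:
--         line = line.strip()
--
--         if line.startswith("def"):
--             explanation.append("• Defines a function")
--
--         elif line.startswith("for"):
--             explanation.append("• Uses a loop for iteration")
--
--         elif line.startswith("if"):
--             explanation.append("• Applies conditional logic")
--
--         elif "return" in line:
--             explanation.append("• Returns output from function")
--
--         elif "append" in line:
--             explanation.append("• Adds elements to a list")
--
--         elif "print" in line: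
--             explanation.append("• Prints output")
--
--     if not explanation:
--         explanation.append("• Code executes sequentially")
--
--     # remove duplicates + keep order
--     seen = set()
--     final = []
--     for item in explanation:
--         if item not in seen:
--             seen.add(item)
--             final.append(item)
--
--     return "\n".join(final)
-- ===== SOURCE B (Python) =====
-- MSGS = [
--     "\u2022 Defines a function",
--     "\u2022 Uses a loop for iteration",
--     "\u2022 Applies conditional logic",
--     "\u2022 Returns output from function",
--     "\u2022 Adds elements to a list",
--     "\u2022 Prints output",
-- ]
--
-- def _classify(line):
--     if line.startswith("def"):
--         return 0
--     if line.startswith("for"):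
--         return 1
--     if line.startswith("if"):
--         return 2
--     if "return" in line:
--         return 3
--     if "append" in line:
--         return 4
--     if "print" in line:
--         return 5
--     return None
--
-- def generate_comment(code: str):
--     # rule-major instead of line-major: map every line to a numeric tag once,
--     # then order the distinct tags by their first occurrence (sort by index);
--     # no seen-set pass over the generated messages is needed.
--     tags = [t for t in (_classify(l.strip()) for l in code.strip().split("\n"))
--             if t is not None]
--     out = [MSGS[k] for k in sorted(set(tags), key=tags.index)]
--     return "\n".join(out) if out else "\u2022 Code executes sequentially"
-- ===== Notes on version B (the rewrite author's own statement) =====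
-- stated objective: alternative
-- what changed: B is rule-major instead of line-major: it classifies each line into a numeric tag, then orders the distinct tags by their first-occurrence index with a keyed sort, replacing A's message-building if/elif pass followed by a separate seen-set deduplication pass.
import Mathlib
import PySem

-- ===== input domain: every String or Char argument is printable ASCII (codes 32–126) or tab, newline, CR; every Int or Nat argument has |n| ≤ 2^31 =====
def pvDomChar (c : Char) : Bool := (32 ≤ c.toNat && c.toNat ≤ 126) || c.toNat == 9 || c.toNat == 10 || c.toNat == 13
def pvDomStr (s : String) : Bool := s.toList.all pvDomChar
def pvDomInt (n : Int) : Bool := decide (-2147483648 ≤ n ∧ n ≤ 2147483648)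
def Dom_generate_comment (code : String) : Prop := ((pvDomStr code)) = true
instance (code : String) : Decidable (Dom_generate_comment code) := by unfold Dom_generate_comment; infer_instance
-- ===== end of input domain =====

-- B is rule-major instead of line-major: it classifies each line into a numeric tag and then
-- orders the distinct tags by first-occurrence index with a keyed sort, replacing A's
-- message-building if/elif pass plus separate seen-set dedup pass (objective: alternative).

-- ===== PORT A =====
-- one step of A's classification loop: the if/elif chain appending to `explanation`
def pvAStep (expl : List String) (line : String) : List String :=
  let l := PySem.Str.strip line
  if PySem.Str.startswith l "def" then expl ++ ["• Defines a function"]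
  else if PySem.Str.startswith l "for" then expl ++ ["• Uses a loop for iteration"]
  else if PySem.Str.startswith l "if" then expl ++ ["• Applies conditional logic"]
  else if PySem.Str.isIn "return" l then expl ++ ["• Returns output from function"]
  else if PySem.Str.isIn "append" l then expl ++ ["• Adds elements to a list"]
  else if PySem.Str.isIn "print" l then expl ++ ["• Prints output"]
  else expl

-- one step of A's dedup loop over (seen, final)
def pvDedupStep (st : PySem.Set String × List String) (item : String) :
    PySem.Set String × List String :=
  if PySem.Set.contains st.1 item then st else (PySem.Set.add st.1 item, st.2 ++ [item])

def generate_comment (code : String) : String :=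
  let lines := (PySem.Str.split? (PySem.Str.strip code) "\n").getD []  -- sep "\n" ≠ "": never none
  let explanation := lines.foldl pvAStep []
  let explanation := if explanation = [] then explanation ++ ["• Code executes sequentially"] else explanation
  let final := (explanation.foldl pvDedupStep (PySem.Set.empty, [])).2
  PySem.Str.join "\n" final

-- ===== PORT B =====
-- MSGS table
def pvMsgs : List String :=
  [ "• Defines a function", "• Uses a loop for iteration", "• Applies conditional logic",
    "• Returns output from function", "• Adds elements to a list", "• Prints output" ]

-- _classify: a (stripped) line's numeric tag, None if no rule matches
def pvClassify (l : String) : Option Nat :=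
  if PySem.Str.startswith l "def" then some 0
  else if PySem.Str.startswith l "for" then some 1
  else if PySem.Str.startswith l "if" then some 2
  else if PySem.Str.isIn "return" l then some 3
  else if PySem.Str.isIn "append" l then some 4
  else if PySem.Str.isIn "print" l then some 5
  else none

def generate_comment_alt (code : String) : String :=
  let lines := (PySem.Str.split? (PySem.Str.strip code) "\n").getD []
  let tags := lines.filterMap (fun l => pvClassify (PySem.Str.strip l))
  -- sorted(set(tags), key=tags.index): key is exact for members of tags (index? is some there)
  let out := (PySem.List.sorted (PySem.Set.ofList tags)
      (fun k => (PySem.List.index? tags k).getD 0)).map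
      (fun k => pvMsgs.getD k "")   -- MSGS[k], k always < 6
  if out = [] then "• Code executes sequentially" else PySem.Str.join "\n" out

-- ===== PRECONDITION & SPEC =====
def Spec_generate_comment (code : String) (out : String) : Prop := out = generate_comment_alt code
instance (code : String) (out : String) : Decidable (Spec_generate_comment code out) := by unfold Spec_generate_comment; infer_instance

-- ===== CLAIM (what is proved, stated in full; the proofs are below) =====
def Claim_equal_generate_comment : Prop := ∀ (code : String), Dom_generate_comment code → Spec_generate_comment code (generate_comment code)

-- ===== LEMMAS AND PROOFS =====

-- A's chain step appends exactly the message of B's classification of the line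
theorem pvAStep_eq : pvAStep = fun expl line =>
    expl ++ ((pvClassify (PySem.Str.strip line)).map (fun k => pvMsgs.getD k "")).toList := by
  funext expl line
  unfold pvAStep pvClassify
  split_ifs <;> simp_all [pvMsgs]

-- A's classification pass produces the messages of B's tag list, in order
theorem pvExpl_eq (lines : List String) :
    lines.foldl pvAStep [] =
      (lines.filterMap (fun l => pvClassify (PySem.Str.strip l))).map (fun k => pvMsgs.getD k "") := by
  rw [pvAStep_eq, PySem.List.foldl_append_eq_flatMap]
  induction lines with
  | nil => rfl
  | cons l ls ih =>
    simp only [List.flatMap_cons, List.filterMap_cons]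
    cases pvClassify (PySem.Str.strip l) <;> simpa using ih

-- A's dedup fold keeps fst = snd and computes Set.ofList
theorem pvDedup_eq (xs : List String) (s : List String) :
    xs.foldl pvDedupStep (s, s) = (xs.foldl PySem.Set.add s, xs.foldl PySem.Set.add s) := by
  induction xs generalizing s with
  | nil => rfl
  | cons x xs ih =>
    simp only [List.foldl_cons]
    have : pvDedupStep (s, s) x = (PySem.Set.add s x, PySem.Set.add s x) := by
      unfold pvDedupStep PySem.Set.add
      split_ifs <;> simp_all
    rw [this, ih]

-- classification tags are < 6
theorem pvClassify_lt (l : String) (k : Nat) (h : pvClassify l = some k) : k < 6 := by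
  unfold pvClassify at h
  split_ifs at h <;> simp_all <;> omega

-- first index of a member is below the length
theorem pvIndex_lt {α : Type} [BEq α] [LawfulBEq α] (xs : List α) (v : α) (k : Nat)
    (h : PySem.List.index? xs v = some k) : k < xs.length := by
  obtain ⟨pre, suf, hx, hlen, -⟩ := (PySem.List.index?_eq_some_iff xs v k).1 h
  subst hx hlen; simp

-- first-occurrence indices strictly increase along Set.ofList's order
theorem pvOfList_pairwise {α : Type} [BEq α] [LawfulBEq α] (xs : List α) :
    (PySem.Set.ofList xs).Pairwise
      (fun a b => (PySem.List.index? xs a).getD 0 < (PySem.List.index? xs b).getD 0) := by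
  induction xs using List.reverseRecOn with
  | nil => simp [PySem.Set.ofList, PySem.Set.empty]
  | append_singleton xs x ih =>
    have hof : PySem.Set.ofList (xs ++ [x]) = PySem.Set.add (PySem.Set.ofList xs) x := by
      simp [PySem.Set.ofList, List.foldl_append]
    rw [hof]
    by_cases hx : x ∈ xs
    · have hc : PySem.Set.contains (PySem.Set.ofList xs) x := by
        simpa [PySem.Set.contains_iff] using (PySem.Set.mem_ofList xs x).2 hx
      rw [PySem.Set.add, if_pos hc]
      refine ih.imp_of_mem ?_
      intro a b ha hb hab
      have ha' : a ∈ xs := (PySem.Set.mem_ofList xs a).1 ha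
      have hb' : b ∈ xs := (PySem.Set.mem_ofList xs b).1 hb
      rwa [PySem.List.index?_append_of_mem _ ha', PySem.List.index?_append_of_mem _ hb']
    · have hc : ¬ PySem.Set.contains (PySem.Set.ofList xs) x := by
        intro h
        exact hx ((PySem.Set.mem_ofList xs x).1 ((PySem.Set.contains_iff _ _).1 h))
      rw [PySem.Set.add, if_neg hc]
      rw [List.pairwise_append]
      refine ⟨?_, List.pairwise_singleton _ _, ?_⟩
      · refine ih.imp_of_mem ?_
        intro a b ha hb hab
        have ha' : a ∈ xs := (PySem.Set.mem_ofList xs a).1 ha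
        have hb' : b ∈ xs := (PySem.Set.mem_ofList xs b).1 hb
        rwa [PySem.List.index?_append_of_mem _ ha', PySem.List.index?_append_of_mem _ hb']
      · intro a ha b hb
        simp only [List.mem_singleton] at hb; subst hb
        have ha' : a ∈ xs := (PySem.Set.mem_ofList xs a).1 ha
        obtain ⟨i, hi⟩ := Option.isSome_iff_exists.1 ((PySem.List.index?_isSome_iff xs a).2 ha')
        rw [PySem.List.index?_append_of_mem _ ha', PySem.List.index?_append_singleton_self xs b hx, hi]
        simpa using pvIndex_lt xs a i hi

-- hence B's keyed sort of set(tags) is exactly first-appearance dedup of tags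
theorem pvSorted_eq_dedup {α : Type} [BEq α] [LawfulBEq α] [LinearOrder α] (xs : List α) :
    PySem.List.sorted (PySem.Set.ofList xs) (fun k => (PySem.List.index? xs k).getD 0) =
      PySem.List.dedup xs := by
  refine PySem.List.sorted_eq_of_perm_of_pairwise_lt _ _ _ ?_ ?_
  · rw [PySem.List.dedup_eq_ofList]
  · rw [PySem.List.dedup_eq_ofList]; exact pvOfList_pairwise xs

-- dedup commutes with mapping a function injective on the list's elements
theorem pvDedup_map {α β : Type} [BEq α] [LawfulBEq α] [BEq β] [LawfulBEq β]
    (f : α → β) (xs : List α)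
    (hinj : ∀ a ∈ xs, ∀ b ∈ xs, f a = f b → a = b) :
    PySem.List.dedup (xs.map f) = (PySem.List.dedup xs).map f := by
  simp only [PySem.List.dedup_eq_ofList]
  induction xs using List.reverseRecOn with
  | nil => rfl
  | append_singleton xs x ih =>
    have hinj' : ∀ a ∈ xs, ∀ b ∈ xs, f a = f b → a = b := fun a ha b hb =>
      hinj a (by simp [ha]) b (by simp [hb])
    have hof : ∀ {γ : Type} [BEq γ] (ys : List γ) (y : γ),
        PySem.Set.ofList (ys ++ [y]) = PySem.Set.add (PySem.Set.ofList ys) y := by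
      intro γ _ ys y; simp [PySem.Set.ofList, List.foldl_append]
    rw [List.map_append, List.map_singleton, hof, hof, ih hinj']
    unfold PySem.Set.add
    have hmem : PySem.Set.contains ((PySem.Set.ofList xs).map f) (f x)
        = PySem.Set.contains (PySem.Set.ofList xs) x := by
      rw [Bool.eq_iff_iff]
      simp only [PySem.Set.contains_iff]
      constructor
      · intro h
        rw [List.mem_map] at h
        obtain ⟨a, ha, hfa⟩ := h
        have ha' : a ∈ xs := (PySem.Set.mem_ofList xs a).1 ha
        have := hinj a (by simp [ha']) x (by simp) hfa
        rwa [← this]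
      · intro h; exact List.mem_map_of_mem h
    rw [hmem]
    split_ifs <;> simp

-- the central fact: A's deduped message list = B's sorted-by-first-index message list
theorem pvFinal_eq (lines : List String) :
    ((lines.foldl pvAStep []).foldl pvDedupStep (PySem.Set.empty, [])).2 =
      (PySem.List.sorted (PySem.Set.ofList (lines.filterMap (fun l => pvClassify (PySem.Str.strip l))))
        (fun k => (PySem.List.index? (lines.filterMap (fun l => pvClassify (PySem.Str.strip l))) k).getD 0)).map
        (fun k => pvMsgs.getD k "") := by
  set tags := lines.filterMap (fun l => pvClassify (PySem.Str.strip l)) with htags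
  have htlt : ∀ t ∈ tags, t < 6 := by
    intro t ht
    rw [htags, List.mem_filterMap] at ht
    obtain ⟨l, -, hl⟩ := ht
    exact pvClassify_lt _ t hl
  have hinj : ∀ a ∈ tags, ∀ b ∈ tags, pvMsgs.getD a "" = pvMsgs.getD b "" → a = b := by
    intro a ha b hb hab
    have ha6 := htlt a ha; have hb6 := htlt b hb
    interval_cases a <;> interval_cases b <;> simp_all [pvMsgs]
  have hempty : (PySem.Set.empty : PySem.Set String) = ([] : List String) := rfl
  rw [pvExpl_eq, hempty, pvDedup_eq, pvSorted_eq_dedup]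
  exact pvDedup_map (fun k => pvMsgs.getD k "") tags hinj

theorem gc_eq (code : String) : generate_comment code = generate_comment_alt code := by
  unfold generate_comment generate_comment_alt
  set lines := (PySem.Str.split? (PySem.Str.strip code) "\n").getD [] with hlines
  simp only []
  by_cases h : lines.foldl pvAStep [] = []
  · -- no line matched: both sides produce the fallback
    have htags : lines.filterMap (fun l => pvClassify (PySem.Str.strip l)) = [] := by
      have := pvExpl_eq lines
      rw [h] at this
      rcases hc : lines.filterMap (fun l => pvClassify (PySem.Str.strip l)) with _ | ⟨t, ts⟩
      · rfl
      · rw [hc] at this; simp at this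
    rw [h, htags]
    simp [PySem.Set.ofList, PySem.Set.empty, PySem.List.sorted, pvDedupStep, PySem.Set.contains,
      PySem.Set.add, PySem.Str.join]
  · have hfe := pvFinal_eq lines
    rw [if_neg h, hfe]
    have hne : (PySem.List.sorted (PySem.Set.ofList (lines.filterMap (fun l => pvClassify (PySem.Str.strip l))))
        (fun k => (PySem.List.index? (lines.filterMap (fun l => pvClassify (PySem.Str.strip l))) k).getD 0)).map
        (fun k => pvMsgs.getD k "") ≠ [] := by
      rw [← hfe]
      intro hnil
      -- A's dedup of a nonempty list is nonempty
      have := pvDedup_eq (lines.foldl pvAStep []) []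
      have hz : (PySem.Set.empty : PySem.Set String) = ([] : List String) := rfl
      rw [hz] at hnil
      rw [this] at hnil
      simp only at hnil
      rcases hc : lines.foldl pvAStep [] with _ | ⟨m, ms⟩
      · exact h hc
      · rw [hc] at hnil
        have hmem : m ∈ List.foldl PySem.Set.add ([] : List String) (m :: ms) := by
          have : m ∈ (m :: ms) := by simp
          exact (PySem.Set.mem_ofList _ _).2 this
        rw [hnil] at hmem
        simp at hmem
    rw [if_neg hne]

-- ===== VERDICT (by name: the statement is the Claim_ definition above) =====
theorem generate_comment_spec : Claim_equal_generate_comment := by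
  intro code _
  exact gc_eq code
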